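-- pv_equiv track=rewrite | github.com/humancipher/Programming_Contest | Programming_Contest/AtCoder/ARC/ARC_090-099/ARC_098/ARC_098_D.py | solve
-- ===== SOURCE A (Python) =====
-- def solve(A,N):
--     A = [0] + A
--     B = [A[i] for i in range(N+1)]
--     C = [A[i] for i in range(N+1)]
--     for i in range(1,N+1):
--         B[i] += B[i-1]
--         C[i] ^= C[i-1]
--     ans = 0
--     for i in range(1,N+1):
--         left,right = i,N+1
--         while right - left > 1:
--             mid = (left+right)//2
--             if B[mid]-B[i-1] > C[mid]^C[i-1]:
--                 right = mid
--             else: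
--                 left = mid
--         ans += (left-(i-1))
--     return ans
-- ===== SOURCE B (Python) =====
-- def solve(A, N):
--     # Two-pointer sliding window: sum - xor of a window is monotone under
--     # extension for nonnegative elements, so valid windows form intervals.
--     ans = 0
--     s = 0
--     x = 0
--     j = 0
--     for i in range(N):
--         while j < N and s + A[j] == x ^ A[j]:
--             s += A[j]
--             x ^= A[j]
--             j += 1
--         ans += j - i
--         s -= A[i]
--         x ^= A[i]
--     return ans
-- ===== Notes on version B (the rewrite author's own statement) =====
-- stated objective: alternative
-- what changed: Replaced the per-start binary search over prefix-sum/prefix-xor arrays by a single two-pointer sliding window that maintains the running sum and xor of the current window, exploiting that sum-minus-xor of a window is monotone under extension for nonnegative elements.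
-- outside the precondition, e.g. on solve([-2, -2], 2): A returns 3, B returns 2
import Mathlib
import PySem

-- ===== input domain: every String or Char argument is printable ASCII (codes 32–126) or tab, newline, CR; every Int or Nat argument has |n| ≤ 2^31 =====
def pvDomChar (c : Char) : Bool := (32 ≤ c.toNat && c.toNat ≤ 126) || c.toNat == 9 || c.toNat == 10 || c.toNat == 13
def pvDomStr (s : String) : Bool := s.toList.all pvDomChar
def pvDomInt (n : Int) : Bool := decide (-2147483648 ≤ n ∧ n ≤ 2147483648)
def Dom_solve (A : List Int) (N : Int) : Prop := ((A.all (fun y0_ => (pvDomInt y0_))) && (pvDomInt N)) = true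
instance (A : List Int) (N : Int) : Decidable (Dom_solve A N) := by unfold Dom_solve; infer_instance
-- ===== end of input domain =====

-- B replaces A's per-start binary search on prefix arrays by a single two-pointer
-- sliding window (objective: alternative; Pre_ excludes negative elements and N > len(A)).


-- ===== PORT A =====
-- 'for i in range(1,N+1): B[i]+=B[i-1]; C[i]^=C[i-1]' — in-place updates as a fold
-- over the pair of list states via List.set (indices are in range under Pre_solve).
def solvePrefix (N : Int) (BC : List Int × List Int) : List Int × List Int :=
  (PySem.List.pyRange 1 (N + 1) 1).foldl
    (fun bc i =>
      (bc.1.set i.toNat (PySem.List.pyGetD bc.1 i 0 + PySem.List.pyGetD bc.1 (i - 1) 0),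
       bc.2.set i.toNat (PySem.Int.bxor (PySem.List.pyGetD bc.2 i 0) (PySem.List.pyGetD bc.2 (i - 1) 0))))
    BC

theorem solveBS_dec1 {left right : Int} (h : right - left > 1) :
    (PySem.Int.floordiv (left + right) 2 - left).toNat < (right - left).toNat := by
  have h2 : PySem.Int.floordiv (left + right) 2 < right := by
    rw [PySem.Int.floordiv_lt_iff_lt_mul (by omega)]; omega
  have h1 : left + 1 ≤ PySem.Int.floordiv (left + right) 2 := by
    rw [PySem.Int.le_floordiv_iff_mul_le (by omega)]; omega
  omega

theorem solveBS_dec2 {left right : Int} (h : right - left > 1) :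
    (right - PySem.Int.floordiv (left + right) 2).toNat < (right - left).toNat := by
  have h2 : PySem.Int.floordiv (left + right) 2 < right := by
    rw [PySem.Int.floordiv_lt_iff_lt_mul (by omega)]; omega
  have h1 : left + 1 ≤ PySem.Int.floordiv (left + right) 2 := by
    rw [PySem.Int.le_floordiv_iff_mul_le (by omega)]; omega
  omega

-- the 'while right - left > 1' binary-search loop
def solveBS (B C : List Int) (i : Int) (left right : Int) : Int :=
  if h : right - left > 1 then
    let mid := PySem.Int.floordiv (left + right) 2
    if PySem.List.pyGetD B mid 0 - PySem.List.pyGetD B (i - 1) 0 >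
        PySem.Int.bxor (PySem.List.pyGetD C mid 0) (PySem.List.pyGetD C (i - 1) 0) then
      solveBS B C i left mid
    else
      solveBS B C i mid right
  else left
termination_by (right - left).toNat
decreasing_by
  · exact solveBS_dec1 h
  · exact solveBS_dec2 h

def solve (A : List Int) (N : Int) : Int :=
  let A' := (0 : Int) :: A
  let B0 := (PySem.List.pyRange 0 (N + 1) 1).map (fun i => PySem.List.pyGetD A' i 0)
  let C0 := (PySem.List.pyRange 0 (N + 1) 1).map (fun i => PySem.List.pyGetD A' i 0)
  let BC := solvePrefix N (B0, C0)
  (PySem.List.pyRange 1 (N + 1) 1).foldl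
    (fun ans i => ans + (solveBS BC.1 BC.2 i i (N + 1) - (i - 1))) 0

-- ===== PORT B =====
-- the 'while j < N and s + A[j] == x ^ A[j]' window-extension loop
def altWhile (A : List Int) (N : Int) (s x j : Int) : Int × Int × Int :=
  if h : j < N ∧ s + PySem.List.pyGetD A j 0 = PySem.Int.bxor x (PySem.List.pyGetD A j 0) then
    altWhile A N (s + PySem.List.pyGetD A j 0) (PySem.Int.bxor x (PySem.List.pyGetD A j 0)) (j + 1)
  else (s, x, j)
termination_by (N - j).toNat
decreasing_by omega

def solve_alt (A : List Int) (N : Int) : Int :=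
  ((PySem.List.pyRange 0 N 1).foldl
    (fun (st : Int × Int × Int × Int) i =>
      let sxj := altWhile A N st.2.1 st.2.2.1 st.2.2.2
      (st.1 + (sxj.2.2 - i), sxj.1 - PySem.List.pyGetD A i 0,
       PySem.Int.bxor sxj.2.1 (PySem.List.pyGetD A i 0), sxj.2.2))
    (0, 0, 0, 0)).1

-- ===== PRECONDITION & SPEC =====
-- Pre_ excludes (a) N > len(A), where A raises IndexError, and (b) lists whose first
-- N elements contain a negative number: there sum<xor can occur and A's binary search
-- runs on a non-monotone predicate, so both results are accidental artefacts.
def Pre_solve (A : List Int) (N : Int) : Prop :=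
  N ≤ (A.length : Int) ∧ ∀ a ∈ A.take N.toNat, 0 ≤ a
instance (A : List Int) (N : Int) : Decidable (Pre_solve A N) := by
  unfold Pre_solve; infer_instance

def pvWitness_solve : List Int × Int := ([1, 2, 4, 3], 4)

def Spec_solve (A : List Int) (N : Int) (out : Int) : Prop := out = solve_alt A N
instance (A : List Int) (N : Int) (out : Int) : Decidable (Spec_solve A N out) := by
  unfold Spec_solve; infer_instance

-- ===== CLAIM (what is proved, stated in full; the proofs are below) =====
def Claim_equal_solve : Prop :=
  ∀ (A : List Int) (N : Int), Dom_solve A N → Pre_solve A N → Spec_solve A N (solve A N)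

-- ===== LEMMAS AND PROOFS =====

-- xor is bounded by the sum (Nat)
theorem pvXorLeAdd : ∀ (fuel a b : Nat), a ≤ fuel → a ^^^ b ≤ a + b := by
  intro fuel
  induction fuel with
  | zero =>
    intro a b ha
    have h : a = 0 := by omega
    subst h; simp
  | succ f ih =>
    intro a b ha
    rcases Nat.eq_zero_or_pos a with rfl | hpos
    · simp
    have h1 : Nat.bit a.bodd a.div2 = a := Nat.bit_bodd_div2 a
    have h2 : Nat.bit b.bodd b.div2 = b := Nat.bit_bodd_div2 b
    have hx : a ^^^ b = Nat.bit (bne a.bodd b.bodd) (a.div2 ^^^ b.div2) := by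
      conv_lhs => rw [← h1, ← h2]
      rw [Nat.xor_bit]
    have hd2 : a.div2 ≤ f := by rw [Nat.div2_val]; omega
    have hrec : a.div2 ^^^ b.div2 ≤ a.div2 + b.div2 := ih _ _ hd2
    have hav : a = 2 * a.div2 + a.bodd.toNat := by rw [← Nat.bit_val, h1]
    have hbv : b = 2 * b.div2 + b.bodd.toNat := by rw [← Nat.bit_val, h2]
    rw [hx, Nat.bit_val]
    cases hba : a.bodd <;> cases hbb : b.bodd <;> simp [hba, hbb] at hav hbv ⊢ <;> omega

-- prefix sum / prefix xor of the first k elements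
def pvS (A : List Int) (k : Nat) : Int := (A.take k).sum
def pvN (A : List Int) (k : Nat) : Nat := (A.take k).foldl (fun acc a => acc ^^^ a.toNat) 0
-- window xor and sum-minus-xor defect of the window [l, m)
def pvW (A : List Int) (l m : Nat) : Nat := pvN A m ^^^ pvN A l
def pvD (A : List Int) (l m : Nat) : Int := (pvS A m - pvS A l) - (pvW A l m : Int)
-- the furthest valid window end for start l (the quantity both programs compute)
def pvG (A : List Int) (n l : Nat) : Nat := Nat.findGreatest (fun m => l ≤ m ∧ pvD A l m = 0) n
-- the two-pointer's j at the start of iteration i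
def pvJ (A : List Int) (n : Nat) : Nat → Nat
  | 0 => 0
  | i + 1 => pvG A n i

theorem pvS_succ (A : List Int) (k : Nat) (hk : k < A.length) :
    pvS A (k + 1) = pvS A k + A[k] := by
  have h : A.take (k + 1) = A.take k ++ [A[k]] := by
    rw [List.take_succ, List.getElem?_eq_getElem hk]
    rfl
  show (A.take (k + 1)).sum = (A.take k).sum + A[k]
  rw [h, List.sum_append, List.sum_cons, List.sum_nil, add_zero]

theorem pvN_succ (A : List Int) (k : Nat) (hk : k < A.length) :
    pvN A (k + 1) = pvN A k ^^^ A[k].toNat := by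
  have h : A.take (k + 1) = A.take k ++ [A[k]] := by
    rw [List.take_succ, List.getElem?_eq_getElem hk]
    rfl
  show (A.take (k + 1)).foldl (fun acc a => acc ^^^ a.toNat) 0 =
    (A.take k).foldl (fun acc a => acc ^^^ a.toNat) 0 ^^^ A[k].toNat
  rw [h, List.foldl_append, List.foldl_cons, List.foldl_nil]

theorem pvA_nonneg (A : List Int) (n : Nat) (hn : n ≤ A.length)
    (h0 : ∀ a ∈ A.take n, 0 ≤ a) (k : Nat) (hk : k < n) :
    0 ≤ A[k]'(by omega) := by
  have hk2 : k < (A.take n).length := by simp [List.length_take]; omega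
  have h := h0 ((A.take n)[k]'hk2) (List.getElem_mem hk2)
  simpa [List.getElem_take] using h

theorem pvA_cast (A : List Int) (n : Nat) (hn : n ≤ A.length)
    (h0 : ∀ a ∈ A.take n, 0 ≤ a) (k : Nat) (hk : k < n) :
    ∃ b : Nat, A[k]'(by omega) = (b : Int) :=
  ⟨(A[k]'(by omega)).toNat, (Int.toNat_of_nonneg (pvA_nonneg A n hn h0 k hk)).symm⟩

theorem pvW_self (A : List Int) (l : Nat) : pvW A l l = 0 := by
  simp [pvW]

theorem pvW_succ (A : List Int) (l m : Nat) (hm : m < A.length) :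
    pvW A l (m + 1) = pvW A l m ^^^ A[m].toNat := by
  unfold pvW
  rw [pvN_succ A m hm, Nat.xor_assoc, Nat.xor_assoc, Nat.xor_comm (A[m].toNat)]

theorem pvW_shift (A : List Int) (l m : Nat) (hl : l < A.length) :
    pvW A (l + 1) m = pvW A l m ^^^ A[l].toNat := by
  unfold pvW
  rw [pvN_succ A l hl, ← Nat.xor_assoc]

theorem pvW_split (A : List Int) (l k m : Nat) :
    pvW A l m = pvW A l k ^^^ pvW A k m := by
  unfold pvW
  apply Nat.eq_of_testBit_eq
  intro i
  simp only [Nat.testBit_xor]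
  cases (pvN A m).testBit i <;> cases (pvN A l).testBit i <;>
    cases (pvN A k).testBit i <;> rfl

theorem pvD_self (A : List Int) (l : Nat) : pvD A l l = 0 := by
  simp [pvD, pvW_self]

theorem pvD_mono_succ (A : List Int) (n : Nat) (hn : n ≤ A.length)
    (h0 : ∀ a ∈ A.take n, 0 ≤ a) (l m : Nat) (hm : m < n) :
    pvD A l m ≤ pvD A l (m + 1) := by
  have hml : m < A.length := by omega
  obtain ⟨b, hb⟩ := pvA_cast A n hn h0 m hm
  have hx : (pvW A l m ^^^ b) ≤ pvW A l m + b :=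
    pvXorLeAdd (pvW A l m) (pvW A l m) b le_rfl
  unfold pvD
  rw [pvS_succ A m hml, pvW_succ A l m hml, hb, Int.toNat_natCast]
  push_cast
  omega

theorem pvD_mono (A : List Int) (n : Nat) (hn : n ≤ A.length)
    (h0 : ∀ a ∈ A.take n, 0 ≤ a) (l m m' : Nat) (hmm : m ≤ m') (hm' : m' ≤ n) :
    pvD A l m ≤ pvD A l m' := by
  induction m' with
  | zero =>
    have h : m = 0 := by omega
    subst h; omega
  | succ t ih =>
    rcases Nat.lt_or_ge m (t + 1) with h | h
    · have h1 : pvD A l m ≤ pvD A l t := ih (by omega) (by omega)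
      have h2 : pvD A l t ≤ pvD A l (t + 1) := pvD_mono_succ A n hn h0 l t (by omega)
      omega
    · have h3 : m = t + 1 := by omega
      subst h3; omega

theorem pvD_nonneg (A : List Int) (n : Nat) (hn : n ≤ A.length)
    (h0 : ∀ a ∈ A.take n, 0 ≤ a) (l m : Nat) (hl : l ≤ m) (hm : m ≤ n) :
    0 ≤ pvD A l m := by
  have h := pvD_mono A n hn h0 l l m hl hm
  rw [pvD_self] at h
  omega

theorem pvD_single (A : List Int) (n : Nat) (hn : n ≤ A.length)
    (h0 : ∀ a ∈ A.take n, 0 ≤ a) (l : Nat) (hl : l < n) :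
    pvD A l (l + 1) = 0 := by
  have hll : l < A.length := by omega
  obtain ⟨b, hb⟩ := pvA_cast A n hn h0 l hl
  unfold pvD
  rw [pvS_succ A l hll, pvW_succ A l l hll, pvW_self, Nat.zero_xor, hb, Int.toNat_natCast]
  push_cast
  omega

theorem pvD_suffix (A : List Int) (n : Nat) (hn : n ≤ A.length)
    (h0 : ∀ a ∈ A.take n, 0 ≤ a) (l k m : Nat) (hlk : l ≤ k) (hkm : k ≤ m)
    (hmn : m ≤ n) (hd : pvD A l m = 0) : pvD A k m = 0 := by
  have d1 : 0 ≤ pvD A l k := pvD_nonneg A n hn h0 l k hlk (by omega)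
  have d2 : 0 ≤ pvD A k m := pvD_nonneg A n hn h0 k m hkm hmn
  have hsplit : pvW A l m = pvW A l k ^^^ pvW A k m := pvW_split A l k m
  have hxle : (pvW A l k ^^^ pvW A k m) ≤ pvW A l k + pvW A k m :=
    pvXorLeAdd (pvW A l k) (pvW A l k) (pvW A k m) le_rfl
  unfold pvD at hd d1 d2 ⊢
  rw [hsplit] at hd
  push_cast at hd
  omega

theorem pvG_le (A : List Int) (n l : Nat) : pvG A n l ≤ n := by
  unfold pvG
  exact Nat.findGreatest_le n

theorem pvG_ge_of (A : List Int) (n l m : Nat) (hm : m ≤ n) (h1 : l ≤ m)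
    (h2 : pvD A l m = 0) : m ≤ pvG A n l := by
  unfold pvG
  exact Nat.le_findGreatest hm ⟨h1, h2⟩

theorem pvG_ge (A : List Int) (n : Nat) (hn : n ≤ A.length)
    (h0 : ∀ a ∈ A.take n, 0 ≤ a) (l : Nat) (hl : l < n) :
    l + 1 ≤ pvG A n l :=
  pvG_ge_of A n l (l + 1) (by omega) (by omega) (pvD_single A n hn h0 l hl)

theorem pvG_spec (A : List Int) (n : Nat) (hn : n ≤ A.length)
    (h0 : ∀ a ∈ A.take n, 0 ≤ a) (l : Nat) (hl : l < n) :
    pvD A l (pvG A n l) = 0 := by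
  unfold pvG
  exact (Nat.findGreatest_spec (P := fun m => l ≤ m ∧ pvD A l m = 0) (n := n)
    (by omega : l + 1 ≤ n) ⟨by omega, pvD_single A n hn h0 l hl⟩).2

theorem pvG_max (A : List Int) (n l m : Nat) (hm : pvG A n l < m) (hm2 : m ≤ n) :
    ¬(l ≤ m ∧ pvD A l m = 0) := by
  unfold pvG at hm
  exact Nat.findGreatest_is_greatest hm hm2

theorem pvG_closed (A : List Int) (n : Nat) (hn : n ≤ A.length)
    (h0 : ∀ a ∈ A.take n, 0 ≤ a) (l m : Nat) (hl : l < n) (hm : l ≤ m)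
    (hm2 : m ≤ pvG A n l) : pvD A l m = 0 := by
  have h1 : pvD A l m ≤ pvD A l (pvG A n l) :=
    pvD_mono A n hn h0 l m (pvG A n l) hm2 (pvG_le A n l)
  have h2 := pvG_spec A n hn h0 l hl
  have h3 := pvD_nonneg A n hn h0 l m hm (le_trans hm2 (pvG_le A n l))
  omega

theorem pvG_mono (A : List Int) (n : Nat) (hn : n ≤ A.length)
    (h0 : ∀ a ∈ A.take n, 0 ≤ a) (l : Nat) (hl : l + 1 < n) :
    pvG A n l ≤ pvG A n (l + 1) :=
  pvG_ge_of A n (l + 1) (pvG A n l) (pvG_le A n l)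
    (pvG_ge A n hn h0 l (by omega))
    (pvD_suffix A n hn h0 l (l + 1) (pvG A n l) (by omega)
      (pvG_ge A n hn h0 l (by omega)) (pvG_le A n l) (pvG_spec A n hn h0 l (by omega)))

-- pyRange normalisations
theorem pvRange0 (n : Nat) :
    PySem.List.pyRange 0 ((n : Int) + 1) 1 =
      (List.range (n + 1)).map (fun (k : Nat) => (k : Int)) := by
  have h := PySem.List.pyRange_zero_natCast (n + 1)
  rwa [(by push_cast; ring : ((n + 1 : Nat) : Int) = (n : Int) + 1)] at h

theorem pvRange1 (n : Nat) :
    PySem.List.pyRange 1 ((n : Int) + 1) 1 =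
      (List.range n).map (fun (k : Nat) => (k : Int) + 1) := by
  have h0 := pvRange0 n
  have hc : PySem.List.pyRange 0 ((n : Int) + 1) 1 =
      0 :: PySem.List.pyRange (0 + 1) ((n : Int) + 1) 1 :=
    PySem.List.pyRange_one_cons (by omega)
  norm_num at hc
  rw [hc, List.range_succ_eq_map, List.map_cons] at h0
  have ht := List.tail_eq_of_cons_eq h0
  rw [ht, List.map_map]
  apply List.map_congr_left
  intro k _
  simp only [Function.comp_apply, Nat.succ_eq_add_one]
  push_cast
  ring

theorem pvFoldSum (t : Int → Int) (l : List Int) (c : Int) :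
    l.foldl (fun acc i => acc + t i) c = c + (l.map t).sum := by
  induction l generalizing c with
  | nil => simp
  | cons x xs ih => simp [ih, add_assoc]

theorem pvMapRangeSet (f : Nat → Int) (m k : Nat) (v : Int) :
    ((List.range m).map f).set k v =
      (List.range m).map (fun t => if t = k then v else f t) := by
  apply List.ext_getElem
  · simp
  · intro i hi1 hi2
    simp only [List.getElem_set, List.getElem_map, List.getElem_range]
    by_cases h : k = i
    · subst h; simp
    · rw [if_neg h, if_neg (by omega)]

theorem pvGetMR (f : Nat → Int) (m k : Nat) (h : k < m) :
    PySem.List.pyGetD ((List.range m).map f) (k : Int) 0 = f k := by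
  rw [PySem.List.pyGetD_natCast, List.getD_eq_getElem?_getD]
  simp [h]

theorem pvGetA (A : List Int) (k : Nat) (h : k < A.length) :
    PySem.List.pyGetD A (k : Int) 0 = A[k] := by
  rw [PySem.List.pyGetD_natCast, List.getD_eq_getElem?_getD]
  simp [List.getElem?_eq_getElem h]

-- the initial B/C array entries of port A and their state after j prefix passes
def pvI (A : List Int) (k : Nat) : Int := ((0 : Int) :: A).getD k 0
def pvMixS (A : List Int) (j k : Nat) : Int := if k ≤ j then pvS A k else pvI A k
def pvMixX (A : List Int) (j k : Nat) : Int := if k ≤ j then ((pvN A k : Nat) : Int) else pvI A k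

theorem pvI_succ (A : List Int) (k : Nat) (h : k < A.length) :
    pvI A (k + 1) = A[k] := by
  simp [pvI, List.getD_eq_getElem?_getD, List.getElem?_eq_getElem h]

theorem pvPrefix_inv (A : List Int) (n : Nat) (hn : n ≤ A.length)
    (h0 : ∀ a ∈ A.take n, 0 ≤ a) (j : Nat) (hj : j ≤ n) :
    ((List.range j).map (fun (k : Nat) => (k : Int) + 1)).foldl
      (fun bc i =>
        (bc.1.set i.toNat (PySem.List.pyGetD bc.1 i 0 + PySem.List.pyGetD bc.1 (i - 1) 0),
         bc.2.set i.toNat (PySem.Int.bxor (PySem.List.pyGetD bc.2 i 0)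
           (PySem.List.pyGetD bc.2 (i - 1) 0))))
      ((List.range (n + 1)).map (fun (k : Nat) => pvI A k),
       (List.range (n + 1)).map (fun (k : Nat) => pvI A k)) =
    ((List.range (n + 1)).map (pvMixS A j), (List.range (n + 1)).map (pvMixX A j)) := by
  induction j with
  | zero =>
    simp only [List.range_zero, List.map_nil, List.foldl_nil, Prod.mk.injEq]
    constructor <;>
    · apply List.map_congr_left
      intro k _
      cases k with
      | zero => simp [pvMixS, pvMixX, pvI, pvS, pvN]
      | succ t => simp [pvMixS, pvMixX]
  | succ j ih =>
    have hj' : j ≤ n := by omega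
    rw [show (List.range (j + 1)).map (fun (k : Nat) => (k : Int) + 1) =
        (List.range j).map (fun (k : Nat) => (k : Int) + 1) ++ [(j : Int) + 1] by
      rw [List.range_succ, List.map_append]
      rfl]
    rw [List.foldl_append, ih hj']
    simp only [List.map_cons, List.map_nil, List.foldl_cons, List.foldl_nil]
    have hjl : j < A.length := by omega
    have hidx : ((j : Int) + 1).toNat = j + 1 := by omega
    have hcast : (j : Int) + 1 = ((j + 1 : Nat) : Int) := by push_cast; ring
    have hsub : (j : Int) + 1 - 1 = ((j : Nat) : Int) := by ring
    have hr1 : PySem.List.pyGetD ((List.range (n + 1)).map (pvMixS A j)) ((j : Int) + 1) 0 =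
        pvMixS A j (j + 1) := by rw [hcast]; exact pvGetMR _ _ _ (by omega)
    have hr2 : PySem.List.pyGetD ((List.range (n + 1)).map (pvMixS A j)) ((j : Int) + 1 - 1) 0 =
        pvMixS A j j := by rw [hsub]; exact pvGetMR _ _ _ (by omega)
    have hr3 : PySem.List.pyGetD ((List.range (n + 1)).map (pvMixX A j)) ((j : Int) + 1) 0 =
        pvMixX A j (j + 1) := by rw [hcast]; exact pvGetMR _ _ _ (by omega)
    have hr4 : PySem.List.pyGetD ((List.range (n + 1)).map (pvMixX A j)) ((j : Int) + 1 - 1) 0 =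
        pvMixX A j j := by rw [hsub]; exact pvGetMR _ _ _ (by omega)
    rw [hr1, hr2, hr3, hr4, hidx]
    obtain ⟨b, hb⟩ := pvA_cast A n hn h0 j (by omega)
    have hvS : pvMixS A j (j + 1) + pvMixS A j j = pvS A (j + 1) := by
      rw [pvMixS, pvMixS, if_neg (by omega), if_pos (le_refl j), pvI_succ A j hjl,
        pvS_succ A j hjl]
      ring
    have hvX : PySem.Int.bxor (pvMixX A j (j + 1)) (pvMixX A j j) =
        ((pvN A (j + 1) : Nat) : Int) := by
      rw [pvMixX, pvMixX, if_neg (by omega), if_pos (le_refl j), pvI_succ A j hjl, hb,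
        PySem.Int.bxor_natCast, pvN_succ A j hjl, hb, Int.toNat_natCast, Nat.xor_comm]
    rw [hvS, hvX, pvMapRangeSet, pvMapRangeSet]
    refine congrArg₂ Prod.mk ?_ ?_ <;>
    · apply List.map_congr_left
      intro k _
      by_cases h1 : k = j + 1
      · subst h1; simp [pvMixS, pvMixX]
      · by_cases h2 : k ≤ j
        · simp only [pvMixS, pvMixX, if_neg h1, if_pos h2, if_pos (by omega : k ≤ j + 1)]
        · simp only [pvMixS, pvMixX, if_neg h1, if_neg h2, if_neg (by omega : ¬ k ≤ j + 1)]

-- the binary-search loop computes pvG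
theorem pvBS_eq (A : List Int) (n : Nat) (hn : n ≤ A.length)
    (h0 : ∀ a ∈ A.take n, 0 ≤ a) (l : Nat) (hl : l < n) :
    ∀ (fuel : Nat) (left right : Int), (right - left).toNat ≤ fuel →
      (l : Int) + 1 ≤ left → left < right → right ≤ (n : Int) + 1 →
      pvD A l left.toNat = 0 →
      (right ≤ (n : Int) → pvD A l right.toNat ≠ 0) →
      solveBS ((List.range (n + 1)).map (fun (k : Nat) => pvS A k))
        ((List.range (n + 1)).map (fun (k : Nat) => ((pvN A k : Nat) : Int)))
        ((l : Int) + 1) left right = ((pvG A n l : Nat) : Int) := by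
  intro fuel
  induction fuel with
  | zero => intro left right hf h1 h2 h3 h4 h5; omega
  | succ f ih =>
    intro left right hf h1 h2 h3 h4 h5
    rw [solveBS]
    by_cases hgap : right - left > 1
    · rw [dif_pos hgap]
      dsimp only
      have hmid1 : left + 1 ≤ PySem.Int.floordiv (left + right) 2 := by
        rw [PySem.Int.le_floordiv_iff_mul_le (by omega)]; omega
      have hmid2 : PySem.Int.floordiv (left + right) 2 < right := by
        rw [PySem.Int.floordiv_lt_iff_lt_mul (by omega)]; omega
      set mid := PySem.Int.floordiv (left + right) 2 with hmiddef
      have hmidn : mid.toNat ≤ n := by omega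
      have hmidcast : mid = ((mid.toNat : Nat) : Int) := by omega
      have hlm : l ≤ mid.toNat := by omega
      have hs1 : PySem.List.pyGetD ((List.range (n + 1)).map (fun (k : Nat) => pvS A k)) mid 0 =
          pvS A mid.toNat := by rw [hmidcast]; exact pvGetMR _ _ _ (by omega)
      have hs2 : PySem.List.pyGetD ((List.range (n + 1)).map (fun (k : Nat) => pvS A k))
          ((l : Int) + 1 - 1) 0 = pvS A l := by
        rw [(by ring : (l : Int) + 1 - 1 = ((l : Nat) : Int))]
        exact pvGetMR _ _ _ (by omega)
      have hx1 : PySem.List.pyGetD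
          ((List.range (n + 1)).map (fun (k : Nat) => ((pvN A k : Nat) : Int))) mid 0 =
          ((pvN A mid.toNat : Nat) : Int) := by
        rw [hmidcast]; exact pvGetMR _ _ _ (by omega)
      have hx2 : PySem.List.pyGetD
          ((List.range (n + 1)).map (fun (k : Nat) => ((pvN A k : Nat) : Int)))
          ((l : Int) + 1 - 1) 0 = ((pvN A l : Nat) : Int) := by
        rw [(by ring : (l : Int) + 1 - 1 = ((l : Nat) : Int))]
        exact pvGetMR _ _ _ (by omega)
      rw [hs1, hs2, hx1, hx2, PySem.Int.bxor_natCast]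
      have hwx : pvN A mid.toNat ^^^ pvN A l = pvW A l mid.toNat := rfl
      rw [hwx]
      by_cases hcond : pvS A mid.toNat - pvS A l > ((pvW A l mid.toNat : Nat) : Int)
      · rw [if_pos hcond]
        apply ih left mid (by omega) h1 (by omega) (by omega) h4
        intro _
        have hgt : pvD A l mid.toNat > 0 := by unfold pvD; omega
        omega
      · rw [if_neg hcond]
        have hd0 : pvD A l mid.toNat = 0 := by
          have hnn := pvD_nonneg A n hn h0 l mid.toNat hlm hmidn
          unfold pvD at hnn ⊢
          omega
        exact ih mid right (by omega) (by omega) (by omega) h3 hd0 h5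
    · rw [dif_neg hgap]
      have hr : right = left + 1 := by omega
      have h0l : 0 ≤ left := by omega
      have hltn : left.toNat ≤ n := by omega
      have hP : left.toNat ≤ pvG A n l := pvG_ge_of A n l left.toNat hltn (by omega) h4
      rcases Nat.lt_or_ge left.toNat (pvG A n l) with hlt | hge
      · exfalso
        have hGle := pvG_le A n l
        have hne := h5 (by omega)
        have hrt : right.toNat = left.toNat + 1 := by omega
        have hcl : pvD A l (left.toNat + 1) = 0 :=
          pvG_closed A n hn h0 l (left.toNat + 1) hl (by omega) (by omega)
        rw [hrt] at hne
        exact hne hcl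
      · omega

-- the window-extension while loop computes pvG
theorem pvWhile_eq (A : List Int) (n : Nat) (hn : n ≤ A.length)
    (h0 : ∀ a ∈ A.take n, 0 ≤ a) (l : Nat) (hl : l < n) :
    ∀ (fuel j0 : Nat), l ≤ j0 → j0 ≤ pvG A n l → pvG A n l - j0 ≤ fuel →
      altWhile A (n : Int) (pvS A j0 - pvS A l) ((pvW A l j0 : Nat) : Int) ((j0 : Nat) : Int) =
        (pvS A (pvG A n l) - pvS A l, ((pvW A l (pvG A n l) : Nat) : Int),
          ((pvG A n l : Nat) : Int)) := by
  have hstop : ∀ j0 : Nat, l ≤ j0 → j0 = pvG A n l →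
      altWhile A (n : Int) (pvS A j0 - pvS A l) ((pvW A l j0 : Nat) : Int) ((j0 : Nat) : Int) =
        (pvS A (pvG A n l) - pvS A l, ((pvW A l (pvG A n l) : Nat) : Int),
          ((pvG A n l : Nat) : Int)) := by
    intro j0 hlj0 hj0
    rw [altWhile, dif_neg]
    · rw [hj0]
    · intro hcondfull
      obtain ⟨hjlt, heq⟩ := hcondfull
      have hjn : j0 < n := by
        have := pvG_le A n l
        omega
      have hjlen : j0 < A.length := by omega
      obtain ⟨b, hb⟩ := pvA_cast A n hn h0 j0 hjn
      rw [pvGetA A j0 hjlen, hb, PySem.Int.bxor_natCast] at heq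
      have hd : pvD A l (j0 + 1) = 0 := by
        unfold pvD
        rw [pvS_succ A j0 hjlen, pvW_succ A l j0 hjlen, hb, Int.toNat_natCast]
        omega
      exact pvG_max A n l (j0 + 1) (by omega) (by omega) ⟨by omega, hd⟩
  intro fuel
  induction fuel with
  | zero =>
    intro j0 hlj hjg hfu
    exact hstop j0 hlj (by omega)
  | succ f ih =>
    intro j0 hlj hjg hfu
    by_cases hj0 : j0 = pvG A n l
    · exact hstop j0 hlj hj0
    · have hjlt : j0 < pvG A n l := by omega
      have hjn : j0 < n := by
        have := pvG_le A n l
        omega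
      have hjlen : j0 < A.length := by omega
      obtain ⟨b, hb⟩ := pvA_cast A n hn h0 j0 hjn
      have hd : pvD A l (j0 + 1) = 0 :=
        pvG_closed A n hn h0 l (j0 + 1) hl (by omega) (by omega)
      rw [altWhile, dif_pos]
      · rw [pvGetA A j0 hjlen]
        have e1 : pvS A j0 - pvS A l + A[j0] = pvS A (j0 + 1) - pvS A l := by
          rw [pvS_succ A j0 hjlen]; ring
        have e2 : PySem.Int.bxor ((pvW A l j0 : Nat) : Int) A[j0] =
            ((pvW A l (j0 + 1) : Nat) : Int) := by
          rw [hb, PySem.Int.bxor_natCast, pvW_succ A l j0 hjlen, hb, Int.toNat_natCast]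
        have e3 : ((j0 : Nat) : Int) + 1 = ((j0 + 1 : Nat) : Int) := by push_cast; ring
        rw [e1, e2, e3]
        exact ih (j0 + 1) (by omega) (by omega) (by omega)
      · constructor
        · exact_mod_cast hjn
        · rw [pvGetA A j0 hjlen]
          have heq : pvS A j0 - pvS A l + A[j0] = ((pvW A l (j0 + 1) : Nat) : Int) := by
            have hrw := hd
            unfold pvD at hrw
            rw [pvS_succ A j0 hjlen] at hrw
            omega
          rw [heq, hb, PySem.Int.bxor_natCast, pvW_succ A l j0 hjlen, hb, Int.toNat_natCast]

-- port A equals the sum of per-start window counts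
theorem pvSolve_eq (A : List Int) (n : Nat) (hn : n ≤ A.length)
    (h0 : ∀ a ∈ A.take n, 0 ≤ a) :
    solve A (n : Int) =
      ((List.range n).map (fun (k : Nat) => ((pvG A n k : Nat) : Int) - (k : Int))).sum := by
  rw [show solve A (n : Int) =
      (PySem.List.pyRange 1 ((n : Int) + 1) 1).foldl
        (fun ans i => ans +
          (solveBS
            (solvePrefix (n : Int)
              ((PySem.List.pyRange 0 ((n : Int) + 1) 1).map
                 (fun i => PySem.List.pyGetD ((0 : Int) :: A) i 0),
               (PySem.List.pyRange 0 ((n : Int) + 1) 1).map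
                 (fun i => PySem.List.pyGetD ((0 : Int) :: A) i 0))).1
            (solvePrefix (n : Int)
              ((PySem.List.pyRange 0 ((n : Int) + 1) 1).map
                 (fun i => PySem.List.pyGetD ((0 : Int) :: A) i 0),
               (PySem.List.pyRange 0 ((n : Int) + 1) 1).map
                 (fun i => PySem.List.pyGetD ((0 : Int) :: A) i 0))).2
            i i ((n : Int) + 1) - (i - 1))) 0 from rfl]
  have hB0 : (PySem.List.pyRange 0 ((n : Int) + 1) 1).map
      (fun i => PySem.List.pyGetD ((0 : Int) :: A) i 0) =
      (List.range (n + 1)).map (fun (k : Nat) => pvI A k) := by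
    rw [pvRange0, List.map_map]
    apply List.map_congr_left
    intro k _
    simp [pvI, PySem.List.pyGetD_natCast]
  rw [hB0]
  have hBC : solvePrefix (n : Int)
      ((List.range (n + 1)).map (fun (k : Nat) => pvI A k),
       (List.range (n + 1)).map (fun (k : Nat) => pvI A k)) =
      ((List.range (n + 1)).map (pvMixS A n), (List.range (n + 1)).map (pvMixX A n)) := by
    unfold solvePrefix
    rw [pvRange1]
    exact pvPrefix_inv A n hn h0 n le_rfl
  rw [hBC]
  dsimp only
  have hmapS : (List.range (n + 1)).map (pvMixS A n) =
      (List.range (n + 1)).map (fun (k : Nat) => pvS A k) := by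
    apply List.map_congr_left
    intro k hk
    simp only [List.mem_range] at hk
    simp [pvMixS, (by omega : k ≤ n)]
  have hmapX : (List.range (n + 1)).map (pvMixX A n) =
      (List.range (n + 1)).map (fun (k : Nat) => ((pvN A k : Nat) : Int)) := by
    apply List.map_congr_left
    intro k hk
    simp only [List.mem_range] at hk
    simp [pvMixX, (by omega : k ≤ n)]
  rw [hmapS, hmapX, pvRange1]
  rw [pvFoldSum (fun i =>
    solveBS ((List.range (n + 1)).map (fun (k : Nat) => pvS A k))
      ((List.range (n + 1)).map (fun (k : Nat) => ((pvN A k : Nat) : Int))) i i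
      ((n : Int) + 1) - (i - 1))]
  rw [List.map_map, zero_add]
  congr 1
  apply List.map_congr_left
  intro k hk
  simp only [List.mem_range] at hk
  simp only [Function.comp_apply]
  have hbs := pvBS_eq A n hn h0 k hk (((n : Int) + 1 - ((k : Int) + 1)).toNat)
    ((k : Int) + 1) ((n : Int) + 1) le_rfl le_rfl (by push_cast; omega) le_rfl
    (by
      rw [(by omega : ((k : Int) + 1).toNat = k + 1)]
      exact pvD_single A n hn h0 k hk)
    (by intro h; omega)
  rw [hbs]
  ring

-- the two-pointer outer loop invariant
theorem pvAlt_inv (A : List Int) (n : Nat) (hn : n ≤ A.length)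
    (h0 : ∀ a ∈ A.take n, 0 ≤ a) :
    ∀ i, i ≤ n →
      ((List.range i).map (fun (k : Nat) => (k : Int))).foldl
        (fun (st : Int × Int × Int × Int) i =>
          let sxj := altWhile A (n : Int) st.2.1 st.2.2.1 st.2.2.2
          (st.1 + (sxj.2.2 - i), sxj.1 - PySem.List.pyGetD A i 0,
           PySem.Int.bxor sxj.2.1 (PySem.List.pyGetD A i 0), sxj.2.2))
        (0, 0, 0, 0) =
      (((List.range i).map (fun (k : Nat) => ((pvG A n k : Nat) : Int) - (k : Int))).sum,
        pvS A (pvJ A n i) - pvS A i, ((pvW A i (pvJ A n i) : Nat) : Int),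
        ((pvJ A n i : Nat) : Int)) := by
  intro i
  induction i with
  | zero =>
    intro _
    simp [pvJ, pvS, pvW_self]
  | succ i ih =>
    intro hi1
    have hi : i < n := by omega
    rw [List.range_succ, List.map_append, List.map_append, List.foldl_append, ih (by omega)]
    simp only [List.map_cons, List.map_nil, List.foldl_cons, List.foldl_nil, List.sum_append,
      List.sum_cons, List.sum_nil]
    have hJle : pvJ A n i ≤ pvG A n i := by
      cases i with
      | zero => simp [pvJ]
      | succ t =>
        have h := pvG_mono A n hn h0 t (by omega)
        simpa [pvJ] using h
    have hJge : i ≤ pvJ A n i := by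
      cases i with
      | zero => simp [pvJ]
      | succ t =>
        have h := pvG_ge A n hn h0 t (by omega)
        simpa [pvJ] using h
    have hwhile := pvWhile_eq A n hn h0 i hi (pvG A n i - pvJ A n i) (pvJ A n i)
      hJge hJle le_rfl
    rw [hwhile]
    dsimp only
    have hilen : i < A.length := by omega
    obtain ⟨b, hb⟩ := pvA_cast A n hn h0 i hi
    rw [pvGetA A i hilen]
    have e2 : pvS A (pvG A n i) - pvS A i - A[i] = pvS A (pvG A n i) - pvS A (i + 1) := by
      rw [pvS_succ A i hilen]; ring
    have e3 : PySem.Int.bxor ((pvW A i (pvG A n i) : Nat) : Int) A[i] =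
        ((pvW A (i + 1) (pvG A n i) : Nat) : Int) := by
      rw [hb, PySem.Int.bxor_natCast, pvW_shift A i (pvG A n i) hilen, hb, Int.toNat_natCast]
    rw [e2, e3]
    simp [pvJ]

theorem pvAlt_eq (A : List Int) (n : Nat) (hn : n ≤ A.length)
    (h0 : ∀ a ∈ A.take n, 0 ≤ a) :
    solve_alt A (n : Int) =
      ((List.range n).map (fun (k : Nat) => ((pvG A n k : Nat) : Int) - (k : Int))).sum := by
  rw [show solve_alt A (n : Int) =
      ((PySem.List.pyRange 0 (n : Int) 1).foldl
        (fun (st : Int × Int × Int × Int) i =>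
          let sxj := altWhile A (n : Int) st.2.1 st.2.2.1 st.2.2.2
          (st.1 + (sxj.2.2 - i), sxj.1 - PySem.List.pyGetD A i 0,
           PySem.Int.bxor sxj.2.1 (PySem.List.pyGetD A i 0), sxj.2.2))
        (0, 0, 0, 0)).1 from rfl]
  have hr : PySem.List.pyRange 0 (n : Int) 1 =
      (List.range n).map (fun (k : Nat) => (k : Int)) :=
    PySem.List.pyRange_zero_natCast n
  rw [hr, pvAlt_inv A n hn h0 n le_rfl]

-- empty pyRange for nonpositive spans
theorem pvRangeNil (a b : Int) (h : b ≤ a) : PySem.List.pyRange a b 1 = [] := by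
  simp [PySem.List.pyRange]
  omega

-- ===== VERDICT (by name: the statement is the Claim_ definition above) =====
theorem solve_spec : Claim_equal_solve := by
  unfold Claim_equal_solve
  intro A N _ hpre
  unfold Spec_solve
  obtain ⟨hn, h0⟩ := hpre
  by_cases hN : 0 ≤ N
  · obtain ⟨n, rfl⟩ : ∃ n : Nat, N = (n : Int) := ⟨N.toNat, (Int.toNat_of_nonneg hN).symm⟩
    have hlen : n ≤ A.length := by exact_mod_cast hn
    have h0' : ∀ a ∈ A.take n, 0 ≤ a := by simpa using h0
    rw [pvSolve_eq A n hlen h0', pvAlt_eq A n hlen h0']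
  · have e1 : PySem.List.pyRange 1 (N + 1) 1 = [] := pvRangeNil _ _ (by omega)
    have e2 : PySem.List.pyRange 0 N 1 = [] := pvRangeNil _ _ (by omega)
    unfold solve solve_alt
    rw [e1, e2]
    simp
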